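-- pv_equiv track=rewrite | github.com/lol70000/Tournament_Planner | api/comp/computing.py | check_already_if_in_gyms
-- ===== SOURCE A (Python) =====
-- def check_already_if_in_gyms(selected_game: list, gyms_dict: dict, counter: int) -> bool:
--     check = 0
--     for i in gyms_dict:
--         if len(gyms_dict[i]) <= counter:
--             continue
--         for selected_team in selected_game:
--             if selected_team in gyms_dict[i][counter]:
--                 check+=1
--     if check > 0:
--         return True
--     else:
--         return False
-- ===== SOURCE B (Python) =====
-- def check_already_if_in_gyms(selected_game: list, gyms_dict: dict, counter: int) -> bool:
--     occupied = {team
--                 for buckets in gyms_dict.values() if len(buckets) > counter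
--                 for team in buckets[counter]}
--     return any(team in occupied for team in selected_game)
-- ===== Notes on version B (the rewrite author's own statement) =====
-- stated objective: simpler
-- what changed: Builds one set of all teams occupying the slot (a comprehension over the gyms whose bucket list is long enough), then a single any-membership pass over the selected teams, instead of rescanning every gym bucket per selected team and counting hits.
-- outside the precondition, e.g. on check_already_if_in_gyms([], {'g': []}, -1): A returns False, B raises IndexError
import Mathlib
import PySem

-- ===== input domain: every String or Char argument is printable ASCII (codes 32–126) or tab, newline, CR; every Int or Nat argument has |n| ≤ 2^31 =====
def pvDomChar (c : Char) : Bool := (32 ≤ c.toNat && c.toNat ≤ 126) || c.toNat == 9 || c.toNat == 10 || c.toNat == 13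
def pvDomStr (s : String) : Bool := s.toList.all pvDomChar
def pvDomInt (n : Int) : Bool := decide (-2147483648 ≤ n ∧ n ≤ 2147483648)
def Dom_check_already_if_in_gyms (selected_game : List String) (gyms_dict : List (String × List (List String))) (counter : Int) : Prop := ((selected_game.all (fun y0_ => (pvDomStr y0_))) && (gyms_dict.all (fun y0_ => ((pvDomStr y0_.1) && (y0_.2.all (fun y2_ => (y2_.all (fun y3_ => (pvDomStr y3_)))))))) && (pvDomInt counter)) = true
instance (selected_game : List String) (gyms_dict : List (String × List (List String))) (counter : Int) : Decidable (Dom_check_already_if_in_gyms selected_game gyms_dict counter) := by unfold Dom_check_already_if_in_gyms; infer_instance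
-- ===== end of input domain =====

-- B replaces A's per-team rescan of every gym with a set comprehension collecting the slot's
-- occupants across gyms, followed by a single any-membership pass over the selected teams.


-- ===== PORT A =====
-- gyms_dict[i][counter] → pyGet?; the none case (IndexError) is excluded by Pre_, .getD [] is the total form.
def check_already_if_in_gyms (selected_game : List String) (gyms_dict : List (String × List (List String))) (counter : Int) : Bool :=
  let check : Int := gyms_dict.foldl (fun check p =>
    if (p.2.length : Int) ≤ counter then check
    else selected_game.foldl (fun check selected_team =>
      if selected_team ∈ (PySem.List.pyGet? p.2 counter).getD [] then check + 1 else check) check) 0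
  if check > 0 then true else false

-- ===== PORT B =====
-- the set comprehension = set(flatten of the qualifying buckets); buckets[counter] → pyGet? (IndexError excluded by Pre_)
def check_already_if_in_gyms_alt (selected_game : List String) (gyms_dict : List (String × List (List String))) (counter : Int) : Bool :=
  let occupied : PySem.Set String :=
    PySem.Set.ofList ((gyms_dict.filter (fun p => counter < (p.2.length : Int))).flatMap
      (fun p => (PySem.List.pyGet? p.2 counter).getD []))
  selected_game.any (fun team => PySem.Set.contains occupied team)

-- ===== PRECONDITION & SPEC =====
-- Pre_ excludes negative counters for which some gym's slot list is shorter than |counter|: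
-- there Python's negative indexing raises (both A and B raise when selected_game is nonempty;
-- A happens to skip the index and return False only when selected_game is empty — B raises there too).
def Pre_check_already_if_in_gyms (selected_game : List String) (gyms_dict : List (String × List (List String))) (counter : Int) : Prop :=
  ¬ (counter < 0 ∧ ∃ p ∈ gyms_dict, (p.2.length : Int) < -counter)
instance (selected_game : List String) (gyms_dict : List (String × List (List String))) (counter : Int) : Decidable (Pre_check_already_if_in_gyms selected_game gyms_dict counter) := by unfold Pre_check_already_if_in_gyms; infer_instance
def pvWitness_check_already_if_in_gyms : List String × (List (String × List (List String))) × Int :=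
  (["x"], [("g", [["a", "x"]]), ("h", [])], 0)

def Spec_check_already_if_in_gyms (selected_game : List String) (gyms_dict : List (String × List (List String))) (counter : Int) (out : Bool) : Prop := out = check_already_if_in_gyms_alt selected_game gyms_dict counter
instance (selected_game : List String) (gyms_dict : List (String × List (List String))) (counter : Int) (out : Bool) : Decidable (Spec_check_already_if_in_gyms selected_game gyms_dict counter out) := by unfold Spec_check_already_if_in_gyms; infer_instance

-- ===== CLAIM (what is proved, stated in full; the proofs are below) =====
def Claim_equal_check_already_if_in_gyms : Prop := ∀ (selected_game : List String) (gyms_dict : List (String × List (List String))) (counter : Int), Dom_check_already_if_in_gyms selected_game gyms_dict counter → Pre_check_already_if_in_gyms selected_game gyms_dict counter → Spec_check_already_if_in_gyms selected_game gyms_dict counter (check_already_if_in_gyms selected_game gyms_dict counter)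

-- ===== LEMMAS AND PROOFS =====

-- inner loop of A counts the selected teams present in the bucket
theorem inner_count (b : List String) (sel : List String) (acc : Int) :
    sel.foldl (fun check t => if t ∈ b then check + 1 else check) acc
      = acc + (sel.countP (fun t => decide (t ∈ b)) : Int) := by
  induction sel generalizing acc with
  | nil => simp
  | cons x xs ih =>
    simp only [List.foldl_cons, List.countP_cons, ih]
    by_cases h : x ∈ b <;> simp [h] <;> ring

-- outer loop of A sums those counts over the gyms
theorem outer_count (sel : List String) (gd : List (String × List (List String))) (c : Int) (acc : Int) :
    gd.foldl (fun check p =>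
      if (p.2.length : Int) ≤ c then check
      else sel.foldl (fun check t =>
        if t ∈ (PySem.List.pyGet? p.2 c).getD [] then check + 1 else check) check) acc
    = acc + (gd.map (fun p => if (p.2.length : Int) ≤ c then (0 : Int)
        else (sel.countP (fun t => decide (t ∈ (PySem.List.pyGet? p.2 c).getD [])) : Int))).sum := by
  induction gd generalizing acc with
  | nil => simp
  | cons p ps ih =>
    simp only [List.foldl_cons, List.map_cons, List.sum_cons, ih]
    by_cases h : (p.2.length : Int) ≤ c
    · simp [h]
    · simp [h, inner_count]; ring

-- a sum of nonnegative integers is positive iff some summand is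
theorem sum_pos_iff_exists (l : List Int) (h : ∀ x ∈ l, 0 ≤ x) :
    0 < l.sum ↔ ∃ x ∈ l, 0 < x := by
  induction l with
  | nil => simp
  | cons x xs ih =>
    have hx := h x (by simp)
    have hxs : 0 ≤ xs.sum := List.sum_nonneg (fun y hy => h y (by simp [hy]))
    have := ih (fun y hy => h y (by simp [hy]))
    simp only [List.sum_cons, List.mem_cons]
    constructor
    · intro hpos
      by_cases hx0 : 0 < x
      · exact ⟨x, Or.inl rfl, hx0⟩
      · rcases this.mp (by omega) with ⟨y, hy, hy0⟩
        exact ⟨y, Or.inr hy, hy0⟩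
    · rintro ⟨y, rfl | hy, hy0⟩ <;> [omega; (have := this.mpr ⟨y, hy, hy0⟩; omega)]

-- membership in B's comprehension set
theorem occupied_mem (gd : List (String × List (List String))) (c : Int) (t : String) :
    (t ∈ PySem.Set.ofList ((gd.filter (fun p => c < (p.2.length : Int))).flatMap
        (fun p => (PySem.List.pyGet? p.2 c).getD [])))
    ↔ ∃ p ∈ gd, c < (p.2.length : Int) ∧ t ∈ (PySem.List.pyGet? p.2 c).getD [] := by
  simp only [PySem.Set.mem_ofList, List.mem_flatMap, List.mem_filter, decide_eq_true_eq]
  constructor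
  · rintro ⟨p, ⟨hp, hc⟩, ht⟩; exact ⟨p, hp, hc, ht⟩
  · rintro ⟨p, hp, hc, ht⟩; exact ⟨p, ⟨hp, hc⟩, ht⟩

theorem check_already_if_in_gyms_eq (sel : List String) (gd : List (String × List (List String))) (c : Int) :
    check_already_if_in_gyms sel gd c = check_already_if_in_gyms_alt sel gd c := by
  unfold check_already_if_in_gyms check_already_if_in_gyms_alt
  rw [Bool.eq_iff_iff]
  simp only [outer_count, zero_add, List.any_eq_true, PySem.Set.contains_iff, occupied_mem]
  constructor
  · intro h
    split_ifs at h with hpos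
    · have hnn : ∀ x ∈ (gd.map (fun p => if (p.2.length : Int) ≤ c then (0 : Int)
          else (sel.countP (fun t => decide (t ∈ (PySem.List.pyGet? p.2 c).getD [])) : Int))), 0 ≤ x := by
        intro x hx
        rcases List.mem_map.mp hx with ⟨q, _, rfl⟩
        split_ifs <;> positivity
      rcases (sum_pos_iff_exists _ hnn).mp hpos with ⟨x, hx, hxpos⟩
      rcases List.mem_map.mp hx with ⟨p, hp, rfl⟩
      by_cases hle : ((p.2.length : Int) ≤ c)
      · simp [hle] at hxpos
      · simp only [hle, if_false] at hxpos
        have : 0 < sel.countP (fun t => decide (t ∈ (PySem.List.pyGet? p.2 c).getD [])) := by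
          exact_mod_cast hxpos
        rcases List.countP_pos_iff.mp this with ⟨t, ht, htb⟩
        exact ⟨t, ht, p, hp, by omega, by simpa using htb⟩
  · rintro ⟨t, ht, p, hp, hgt, htb⟩
    have hpos : (0 : Int) < (gd.map (fun p => if (p.2.length : Int) ≤ c then (0 : Int)
        else (sel.countP (fun t => decide (t ∈ (PySem.List.pyGet? p.2 c).getD [])) : Int))).sum := by
      refine (sum_pos_iff_exists _ ?_).mpr ?_
      · intro x hx
        rcases List.mem_map.mp hx with ⟨q, _, rfl⟩
        split_ifs <;> positivity
      · refine ⟨_, List.mem_map.mpr ⟨p, hp, rfl⟩, ?_⟩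
        have hle : ¬ ((p.2.length : Int) ≤ c) := by omega
        simp only [hle, if_false]
        have : 0 < sel.countP (fun u => decide (u ∈ (PySem.List.pyGet? p.2 c).getD [])) :=
          List.countP_pos_iff.mpr ⟨t, ht, by simpa using htb⟩
        exact_mod_cast this
    simp [hpos]

-- ===== VERDICT (by name: the statement is the Claim_ definition above) =====
theorem check_already_if_in_gyms_spec : Claim_equal_check_already_if_in_gyms := by
  intro sel gd c _ _
  unfold Spec_check_already_if_in_gyms
  exact check_already_if_in_gyms_eq sel gd c
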